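-- pv_equiv track=rewrite | github.com/rizna96898/LocalFlaskServer | src/helpers/string_utils.py | clean_for_save
-- ===== SOURCE A (Python) =====
-- def clean_for_save(text: str) -> str:
--     if not text:
--         return ""
--
--     text = text.replace("\r\n", "\n").replace("\r", "\n")
--     text = text.replace("\r\n", "\n").replace("\r", "\n")
--
--     lines = text.split("\n")
--
--     result = []
--     prev_blank = False
--
--     for line in lines:
--         line = line.strip()
--
--         if not line:
--             if not prev_blank:
--                 result.append("")
--             prev_blank = True
--             continue
--
--         result.append(line)
--         prev_blank = False
--
--     while result and result[0] == "":
--         result.pop(0)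
--     while result and result[-1] == "":
--         result.pop()
--
--     return "".join(result)
-- ===== SOURCE B (Python) =====
-- def clean_for_save(text: str) -> str:
--     normalized = text.replace("\r\n", "\n").replace("\r", "\n")
--     return "".join(
--         stripped for line in normalized.split("\n") if (stripped := line.strip())
--     )
-- ===== Notes on version B (the rewrite author's own statement) =====
-- stated objective: simpler
-- what changed: Because the final join uses an empty separator, the blank-collapse state and both trim loops are inert; B is a single filter-join of the stripped non-empty lines, with one normalization pass instead of A's duplicated one and no prev_blank accumulator or pop loops.
import Mathlib
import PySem

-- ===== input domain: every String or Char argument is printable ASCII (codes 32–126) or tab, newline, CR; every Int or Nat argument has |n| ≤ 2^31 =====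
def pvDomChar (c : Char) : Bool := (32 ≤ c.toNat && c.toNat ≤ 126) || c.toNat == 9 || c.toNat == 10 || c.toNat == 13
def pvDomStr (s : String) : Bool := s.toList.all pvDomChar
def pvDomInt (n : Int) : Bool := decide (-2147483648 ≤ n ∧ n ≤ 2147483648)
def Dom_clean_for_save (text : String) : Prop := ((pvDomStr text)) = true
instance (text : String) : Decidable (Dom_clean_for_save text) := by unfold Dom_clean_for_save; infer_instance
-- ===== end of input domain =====

-- B drops A's inert blank-collapse state, pop loops and duplicated normalization: with an empty
-- join separator the result is just the concatenation of the stripped non-empty lines.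


-- ===== PORT A =====
-- the body of A's 'for line in lines' loop (state: result so far, prev_blank)
def pyCleanLoop (st : List String × Bool) (line : String) : List String × Bool :=
  let line := PySem.Str.strip line
  if line = "" then
    (if st.2 = false then st.1 ++ [""] else st.1, true)
  else
    (st.1 ++ [line], false)

-- 'while result and result[0] == "": result.pop(0)'
def pyTrimFront : List String → List String
  | [] => []
  | x :: xs => if x = "" then pyTrimFront xs else x :: xs

-- 'while result and result[-1] == "": result.pop()' (popping from the back = front pops on the reverse)
def pyTrimBack (rs : List String) : List String :=
  (pyTrimFront rs.reverse).reverse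

def clean_for_save (text : String) : String :=
  if text = "" then ""
  else
    let t1 := PySem.Str.replace (PySem.Str.replace text "\r\n" "\n") "\r" "\n"
    let t2 := PySem.Str.replace (PySem.Str.replace t1 "\r\n" "\n") "\r" "\n"
    let lines := (PySem.Str.split? t2 "\n").getD []
    let res := (lines.foldl pyCleanLoop ([], false)).1
    PySem.Str.join "" (pyTrimBack (pyTrimFront res))

-- ===== PORT B =====
def clean_for_save_alt (text : String) : String :=
  let normalized := PySem.Str.replace (PySem.Str.replace text "\r\n" "\n") "\r" "\n"
  let lines := (PySem.Str.split? normalized "\n").getD []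
  PySem.Str.join "" ((lines.map PySem.Str.strip).filter (· ≠ ""))

-- ===== PRECONDITION & SPEC =====
def Spec_clean_for_save (text : String) (out : String) : Prop := out = clean_for_save_alt text
instance (text : String) (out : String) : Decidable (Spec_clean_for_save text out) := by unfold Spec_clean_for_save; infer_instance

-- ===== CLAIM (what is proved, stated in full; the proofs are below) =====
def Claim_equal_clean_for_save : Prop := ∀ (text : String), Dom_clean_for_save text → Spec_clean_for_save text (clean_for_save text)

-- ===== LEMMAS AND PROOFS =====

-- concatenation of the character contents of a list of strings
def charsOf (rs : List String) : List Char := (rs.map String.toList).flatten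

theorem replace_go_no_occ (rest new : List Char) :
    ∀ (fuel : Nat) (l acc : List Char), (∀ c ∈ l, c ≠ '\r') →
      PySem.Chars.replace.go ('\r' :: rest) new fuel l acc = acc.reverse ++ l := by
  intro fuel
  induction fuel with
  | zero => intro l acc _; simp [PySem.Chars.replace.go]
  | succ n ih =>
    intro l acc h
    cases l with
    | nil => simp [PySem.Chars.replace.go]
    | cons c t =>
      have hc : c ≠ '\r' := h c (by simp)
      have hpre : ('\r' :: rest).isPrefixOf (c :: t) = false := by
        simp [List.isPrefixOf]
        intro hh; exact absurd hh.symm hc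
      simp only [PySem.Chars.replace.go, hpre]
      rw [if_neg (by simp)]
      rw [ih t (c :: acc) (fun x hx => h x (by simp [hx]))]
      simp

theorem replace_no_r_in_result :
    ∀ (fuel : Nat) (l acc : List Char), l.length ≤ fuel → (∀ c ∈ acc, c ≠ '\r') →
      ∀ c ∈ PySem.Chars.replace.go ['\r'] ['\n'] fuel l acc, c ≠ '\r' := by
  intro fuel
  induction fuel with
  | zero =>
    intro l acc hlen hacc
    have : l = [] := List.eq_nil_of_length_eq_zero (Nat.le_zero.mp hlen)
    subst this
    simpa [PySem.Chars.replace.go] using fun c hc => hacc c (by simpa using hc)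
  | succ n ih =>
    intro l acc hlen hacc
    cases l with
    | nil =>
      simpa [PySem.Chars.replace.go] using fun c hc => hacc c (by simpa using hc)
    | cons c t =>
      by_cases hc : c = '\r'
      · subst hc
        have hpre : (['\r'] : List Char).isPrefixOf ('\r' :: t) = true := by
          simp [List.isPrefixOf]
        simp only [PySem.Chars.replace.go, hpre, if_pos]
        exact ih t ('\n' :: acc) (by simpa using Nat.le_of_succ_le_succ hlen)
          (by intro x hx
              rcases List.mem_cons.mp hx with hx | hx
              · simp [hx]
              · exact hacc x hx)
      · have hpre : (['\r'] : List Char).isPrefixOf (c :: t) = false := by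
          simp [List.isPrefixOf]
          intro hh; exact absurd hh.symm hc
        simp only [PySem.Chars.replace.go, hpre]
        rw [if_neg (by simp)]
        exact ih t (c :: acc) (by simpa using Nat.le_of_succ_le_succ hlen)
          (by intro x hx
              rcases List.mem_cons.mp hx with hx | hx
              · subst hx; exact hc
              · exact hacc x hx)

theorem replace_cr_no_r (s : List Char) :
    ∀ c ∈ PySem.Chars.replace s ['\r'] ['\n'], c ≠ '\r' := by
  simpa [PySem.Chars.replace] using replace_no_r_in_result s.length s [] le_rfl (by simp)

theorem replace_id_of_no_r (s : List Char) (rest new : List Char)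
    (h : ∀ c ∈ s, c ≠ '\r') :
    PySem.Chars.replace s ('\r' :: rest) new = s := by
  simpa [PySem.Chars.replace] using replace_go_no_occ rest new s.length s [] h

-- normalizing an already-normalized string changes nothing
theorem pyNormalize_idem (t1 : String)
    (h : ∀ c ∈ t1.toList, c ≠ '\r') :
    PySem.Str.replace (PySem.Str.replace t1 "\r\n" "\n") "\r" "\n" = t1 := by
  apply String.toList_inj.mp
  have h1 : (PySem.Str.replace t1 "\r\n" "\n").toList = t1.toList := by
    rw [PySem.Str.toList_replace]
    exact replace_id_of_no_r t1.toList ['\n'] ['\n'] h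
  rw [PySem.Str.toList_replace, h1]
  exact replace_id_of_no_r t1.toList [] ['\n'] h

theorem intercalate_nil_eq_flatten (xss : List (List Char)) :
    List.intercalate ([] : List Char) xss = xss.flatten := by
  induction xss with
  | nil => simp [List.intercalate]
  | cons x xs ih =>
    cases xs with
    | nil => simp [List.intercalate]
    | cons y ys =>
      simp only [List.intercalate, List.intersperse] at *
      simp_all

theorem join_empty_sep (rs : List String) :
    (PySem.Str.join "" rs).toList = charsOf rs := by
  rw [PySem.Str.toList_join]
  simp [PySem.Chars.join, charsOf, intercalate_nil_eq_flatten]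

theorem charsOf_fold (lines : List String) :
    ∀ (acc : List String) (pb : Bool),
      charsOf (lines.foldl pyCleanLoop (acc, pb)).1
        = charsOf acc ++ charsOf ((lines.map PySem.Str.strip).filter (· ≠ "")) := by
  induction lines with
  | nil => intro acc pb; simp [charsOf]
  | cons line rest ih =>
    intro acc pb
    simp only [List.foldl_cons, List.map_cons, List.filter_cons]
    by_cases hs : PySem.Str.strip line = ""
    · rw [show pyCleanLoop (acc, pb) line = (if pb = false then acc ++ [""] else acc, true) from
        by simp [pyCleanLoop, hs]]
      cases pb
      · rw [ih]; simp [hs, charsOf]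
      · rw [ih]; simp [hs]
    · rw [show pyCleanLoop (acc, pb) line = (acc ++ [PySem.Str.strip line], false) from
        by simp [pyCleanLoop, hs]]
      rw [ih]
      simp [hs, charsOf]

theorem charsOf_trimFront (rs : List String) : charsOf (pyTrimFront rs) = charsOf rs := by
  induction rs with
  | nil => rfl
  | cons x xs ih =>
    by_cases hx : x = ""
    · simp only [pyTrimFront, hx, if_pos]
      simpa [charsOf] using ih
    · simp [pyTrimFront, hx]

theorem trimBack_append (ys : List String) (y : String) :
    pyTrimBack (ys ++ [y]) = if y = "" then pyTrimBack ys else ys ++ [y] := by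
  by_cases hy : y = ""
  · simp [pyTrimBack, pyTrimFront, hy]
  · simp [pyTrimBack, pyTrimFront, hy]

theorem charsOf_trimBack (rs : List String) : charsOf (pyTrimBack rs) = charsOf rs := by
  induction rs using List.reverseRecOn with
  | nil => rfl
  | append_singleton ys y ih =>
    rw [trimBack_append]
    by_cases hy : y = ""
    · rw [if_pos hy, ih, hy]
      simp [charsOf]
    · simp [hy]

-- ===== VERDICT (by name: the statement is the Claim_ definition above) =====
theorem clean_for_save_spec : Claim_equal_clean_for_save := by
  intro text _
  unfold Spec_clean_for_save clean_for_save clean_for_save_alt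
  by_cases h0 : text = ""
  · subst h0; decide
  · rw [if_neg h0]
    have hnorm := pyNormalize_idem
      (PySem.Str.replace (PySem.Str.replace text "\r\n" "\n") "\r" "\n")
      (by
        rw [PySem.Str.toList_replace]
        exact replace_cr_no_r _)
    simp only [hnorm]
    apply String.toList_inj.mp
    rw [join_empty_sep, join_empty_sep, charsOf_trimBack, charsOf_trimFront]
    rw [charsOf_fold]
    simp [charsOf]
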